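-- pv_equiv track=rewrite | github.com/wise-bit/advent-of-code | 2025/day03.py | best_two
-- ===== SOURCE A (Python) =====
-- def best_two(bank):
--   batteries = list(map(int, bank))
--   l = len(batteries)
--
--   m = -1
--   x, y = 0, 0
--
--   for i in range(l):
--     for j in range(i+1, l):
--       _x, _y = batteries[i], batteries[j]
--       s = _x * 10 + _y
--
--       if s > m:
--         m = s
--         x, y = i, j
--
--   return (x, y)
-- ===== SOURCE B (Python) =====
-- def best_two(bank):
--   # One pass: for each right index j, the best left index is the earliest
--   # position of the running prefix maximum.
--   batteries = list(map(int, bank))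
--   m = -1
--   x, y = 0, 0
--   best_val, best_idx = None, 0
--   for j in range(1, len(batteries)):
--     v = batteries[j - 1]
--     if best_val is None or v > best_val:
--       best_val, best_idx = v, j - 1
--     s = best_val * 10 + batteries[j]
--     if s > m:
--       m = s
--       x, y = best_idx, j
--   return (x, y)
-- ===== Notes on version B (the rewrite author's own statement) =====
-- stated objective: faster
-- what changed: Replaced the O(n^2) scan over all index pairs (i, j) with a single left-to-right pass that maintains the running prefix maximum of batteries[0..j-1] together with its earliest index, combining it with batteries[j] at each step.
import Mathlib
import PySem

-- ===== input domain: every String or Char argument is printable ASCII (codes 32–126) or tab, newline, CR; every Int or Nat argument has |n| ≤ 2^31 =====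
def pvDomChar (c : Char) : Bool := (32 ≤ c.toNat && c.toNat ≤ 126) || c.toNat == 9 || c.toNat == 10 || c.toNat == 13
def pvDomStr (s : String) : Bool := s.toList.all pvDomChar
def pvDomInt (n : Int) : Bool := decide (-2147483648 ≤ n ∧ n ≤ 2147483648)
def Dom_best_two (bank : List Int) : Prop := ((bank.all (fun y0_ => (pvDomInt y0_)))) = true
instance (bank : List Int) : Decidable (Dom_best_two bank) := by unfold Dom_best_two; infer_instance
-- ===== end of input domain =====

-- B is a single pass: for each right index j it combines a[j] with the running
-- prefix maximum (earliest index), instead of A's scan over all pairs (i, j).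

-- ===== PORT A =====
def best_two (bank : List Int) : List Int :=
  let batteries := bank.map (fun z => z)   -- list(map(int, bank)): int() on an int is the identity
  let l : Int := (batteries.length : Int)
  let st :=
    (PySem.List.pyRange 0 l 1).foldl (fun st i =>
      (PySem.List.pyRange (i + 1) l 1).foldl (fun st j =>
        let _x := PySem.List.pyGetD batteries i 0
        let _y := PySem.List.pyGetD batteries j 0
        let s := _x * 10 + _y
        if s > st.1 then (s, i, j) else st) st)
      ((-1 : Int), (0 : Int), (0 : Int))
  [st.2.1, st.2.2]

-- ===== PORT B =====
def best_two_alt (bank : List Int) : List Int :=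
  let batteries := bank.map (fun z => z)
  let st :=
    (PySem.List.pyRange 1 (batteries.length : Int) 1).foldl (fun st j =>
      let v := PySem.List.pyGetD batteries (j - 1) 0
      let bv : Int := match st.2.1 with
        | none => v
        | some bv0 => if v > bv0 then v else bv0
      let bi : Int := match st.2.1 with
        | none => j - 1
        | some bv0 => if v > bv0 then j - 1 else st.2.2
      let s := bv * 10 + PySem.List.pyGetD batteries j 0
      if s > st.1.1 then ((s, bi, j), (some bv, bi)) else (st.1, (some bv, bi)))
      (((-1 : Int), (0 : Int), (0 : Int)), ((none : Option Int), (0 : Int)))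
  [st.1.2.1, st.1.2.2]

-- ===== PRECONDITION & SPEC =====
def Spec_best_two (bank : List Int) (out : List Int) : Prop := out = best_two_alt bank
instance (bank : List Int) (out : List Int) : Decidable (Spec_best_two bank out) := by unfold Spec_best_two; infer_instance

-- ===== CLAIM (what is proved, stated in full; the proofs are below) =====
def Claim_equal_best_two : Prop := ∀ (bank : List Int), Dom_best_two bank → Spec_best_two bank (best_two bank)

-- ===== LEMMAS AND PROOFS =====
-- Proof plan: both ports are folds of the same strict-improvement update pvUpd
-- over lists of (score, i, j) triples: A over all pairs i < j in lexicographic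
-- order (pvTailP _ n 0), B over one candidate per right index j built from the
-- earliest prefix-maximum (pvCands).  pvMain/pvCompanion show that inserting the
-- column of pairs (i, n) into the pair list changes the fold exactly by one
-- update with the candidate for j = n; pvBridge iterates this to identify the
-- two folds, and pvCharA/pvCharB connect the ports to these folds.


def pvUpd (st p : Int × Int × Int) : Int × Int × Int := if p.1 > st.1 then p else st

def pvAv (a : List Int) (i : Nat) : Int := a.getD i 0

def pvGp (a : List Int) (i j : Nat) : Int × Int × Int := (pvAv a i * 10 + pvAv a j, (i : Int), (j : Int))

def pvBlock (a : List Int) (n i : Nat) : List (Int × Int × Int) :=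
  (List.range (n - (i+1))).map (fun t => pvGp a i (i+1+t))

def pvTailP (a : List Int) (n s : Nat) : List (Int × Int × Int) :=
  (List.range' s (n - s)).flatMap (pvBlock a n)

def pvTailI (a : List Int) (n s : Nat) : List (Int × Int × Int) :=
  (List.range' s (n - s)).flatMap (pvBlock a (n+1))

def pvPe (a : List Int) : Nat → Int × Nat
  | 0 => (pvAv a 0, 0)
  | k+1 => if pvAv a (k+1) > (pvPe a k).1 then (pvAv a (k+1), k+1) else pvPe a k

def pvCand (a : List Int) (j : Nat) : Int × Int × Int :=
  ((pvPe a (j-1)).1 * 10 + pvAv a j, ((pvPe a (j-1)).2 : Int), (j : Int))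

def pvCands (a : List Int) (n : Nat) : List (Int × Int × Int) :=
  (List.range (n-1)).map (fun k => pvCand a (k+1))



lemma pvUpd_fst_le (L : List (Int × Int × Int)) (st : Int × Int × Int) :
    st.1 ≤ (L.foldl pvUpd st).1 := by
  induction L generalizing st with
  | nil => simp
  | cons q L ih =>
    simp only [List.foldl_cons]
    refine le_trans ?_ (ih (pvUpd st q))
    unfold pvUpd; split <;> omega

lemma pvUpd_mem_le (L : List (Int × Int × Int)) (st p : Int × Int × Int) (hp : p ∈ L) :
    p.1 ≤ (L.foldl pvUpd st).1 := by
  induction L generalizing st with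
  | nil => simp at hp
  | cons q L ih =>
    simp only [List.foldl_cons]
    rcases List.mem_cons.mp hp with h | h
    · subst h
      refine le_trans ?_ (pvUpd_fst_le L (pvUpd st p))
      unfold pvUpd; split <;> omega
    · exact ih (pvUpd st q) h

lemma pvUpd_skip (L : List (Int × Int × Int)) (st : Int × Int × Int)
    (h : ∀ q ∈ L, q.1 ≤ st.1) : L.foldl pvUpd st = st := by
  induction L with
  | nil => simp
  | cons q L ih =>
    simp only [List.foldl_cons]
    have hq : q.1 ≤ st.1 := h q (by simp)
    have : pvUpd st q = st := by unfold pvUpd; split <;> [omega; rfl]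
    rw [this]
    exact ih (fun r hr => h r (by simp [hr]))

lemma pvUpd_two_state (L : List (Int × Int × Int)) (t1 t2 : Int × Int × Int)
    (h12 : t1.1 ≤ t2.1) (hq : ∃ q ∈ L, t2.1 < q.1) :
    L.foldl pvUpd t1 = L.foldl pvUpd t2 := by
  induction L generalizing t1 t2 with
  | nil => simp at hq
  | cons r L ih =>
    simp only [List.foldl_cons]
    by_cases hr : t2.1 < r.1
    · have h1 : pvUpd t1 r = r := by unfold pvUpd; split <;> [rfl; omega]
      have h2 : pvUpd t2 r = r := by unfold pvUpd; split <;> [rfl; omega]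
      rw [h1, h2]
    · have h2 : pvUpd t2 r = t2 := by unfold pvUpd; split <;> [omega; rfl]
      rw [h2]
      obtain ⟨q, hqL, hq2⟩ := hq
      have hqL' : q ∈ L := by
        rcases List.mem_cons.mp hqL with h | h
        · subst h; omega
        · exact h
      by_cases h1r : t1.1 < r.1
      · have h1 : pvUpd t1 r = r := by unfold pvUpd; split <;> [rfl; omega]
        rw [h1]
        exact ih r t2 (by omega) ⟨q, hqL', hq2⟩
      · have h1 : pvUpd t1 r = t1 := by unfold pvUpd; split <;> [omega; rfl]
        rw [h1]
        exact ih t1 t2 h12 ⟨q, hqL', hq2⟩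

-- pe lemmas
lemma pvPe_eq (a : List Int) (k : Nat) :
    pvPe a (k+1) = if pvAv a (k+1) > (pvPe a k).1 then (pvAv a (k+1), k+1) else pvPe a k := rfl

lemma pvPe_le (a : List Int) (k : Nat) : (pvPe a k).2 ≤ k := by
  induction k with
  | zero => simp [pvPe]
  | succ k ih =>
    rw [pvPe_eq]; split
    · omega
    · omega

lemma pvPe_val (a : List Int) (k : Nat) : pvAv a (pvPe a k).2 = (pvPe a k).1 := by
  induction k with
  | zero => simp [pvPe]
  | succ k ih => rw [pvPe_eq]; split <;> simp_all

lemma pvPe_ub (a : List Int) (k i : Nat) (h : i ≤ k) : pvAv a i ≤ (pvPe a k).1 := by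
  induction k with
  | zero =>
    have h0 : i = 0 := by omega
    subst h0; simp [pvPe]
  | succ k ih =>
    rw [pvPe_eq]
    rcases Nat.lt_or_ge i (k+1) with h' | h'
    · have := ih (by omega); split
      · simp only; omega
      · omega
    · have hik : i = k + 1 := by omega
      subst hik; split
      · omega
      · omega

lemma pvPe_first (a : List Int) (k i : Nat) (h : i < (pvPe a k).2) : pvAv a i < (pvPe a k).1 := by
  induction k with
  | zero => simp [pvPe] at h
  | succ k ih =>
    rw [pvPe_eq] at h ⊢
    split at h
    · next hgt =>
      simp only at h ⊢
      have hle := pvPe_le a k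
      have := pvPe_ub a k i (by omega)
      simp only [if_pos hgt]
      omega
    · next hgt => simp only [if_neg hgt]; exact ih h

-- membership
lemma pvMem_block (a : List Int) (n i : Nat) (q : Int × Int × Int) :
    q ∈ pvBlock a n i ↔ ∃ j, i < j ∧ j < n ∧ q = pvGp a i j := by
  unfold pvBlock
  simp only [List.mem_map, List.mem_range]
  constructor
  · rintro ⟨t, ht, rfl⟩; exact ⟨i+1+t, by omega, by omega, rfl⟩
  · rintro ⟨j, hij, hjn, rfl⟩
    exact ⟨j - (i+1), by omega, by congr 1; omega⟩

lemma pvBlock_succ (a : List Int) (n i : Nat) (h : i < n) :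
    pvBlock a (n+1) i = pvBlock a n i ++ [pvGp a i n] := by
  unfold pvBlock
  have h1 : n + 1 - (i+1) = (n - (i+1)) + 1 := by omega
  rw [h1, List.range_succ, List.map_append]
  simp only [List.map_cons, List.map_nil]
  have h2 : i + 1 + (n - (i+1)) = n := by omega
  rw [h2]

lemma pvMem_tailI (a : List Int) (n s : Nat) (q : Int × Int × Int) (h : q ∈ pvTailI a n s) :
    ∃ i j, s ≤ i ∧ i < n ∧ i < j ∧ j ≤ n ∧ q = pvGp a i j := by
  unfold pvTailI at h
  obtain ⟨i, hi, hq⟩ := List.mem_flatMap.mp h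
  have hi' := List.mem_range'_1.mp hi
  obtain ⟨j, hij, hjn, rfl⟩ := (pvMem_block a (n+1) i q).mp hq
  exact ⟨i, j, by omega, by omega, hij, by omega, rfl⟩

lemma pvMem_tailP (a : List Int) (n s : Nat) (q : Int × Int × Int) (h : q ∈ pvTailP a n s) :
    ∃ i j, s ≤ i ∧ i < j ∧ j < n ∧ q = pvGp a i j := by
  unfold pvTailP at h
  obtain ⟨i, hi, hq⟩ := List.mem_flatMap.mp h
  have hi' := List.mem_range'_1.mp hi
  obtain ⟨j, hij, hjn, rfl⟩ := (pvMem_block a n i q).mp hq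
  exact ⟨i, j, by omega, hij, hjn, rfl⟩

lemma pvP_mem_tailI (a : List Int) (n s e : Nat) (hse : s ≤ e) (hen : e < n) :
    pvGp a e n ∈ pvTailI a n s := by
  unfold pvTailI
  refine List.mem_flatMap.mpr ⟨e, List.mem_range'_1.mpr ⟨hse, by omega⟩, ?_⟩
  exact (pvMem_block a (n+1) e _).mpr ⟨n, hen, by omega, rfl⟩

lemma pvTailI_cons (a : List Int) (n s : Nat) (h : s < n) :
    pvTailI a n s = pvBlock a (n+1) s ++ pvTailI a n (s+1) := by
  unfold pvTailI
  have h1 : n - s = (n - (s+1)) + 1 := by omega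
  rw [h1, List.range'_succ, List.flatMap_cons]

lemma pvTailP_cons (a : List Int) (n s : Nat) (h : s < n) :
    pvTailP a n s = pvBlock a n s ++ pvTailP a n (s+1) := by
  unfold pvTailP
  have h1 : n - s = (n - (s+1)) + 1 := by omega
  rw [h1, List.range'_succ, List.flatMap_cons]

lemma pvGp_le (a : List Int) (n i j : Nat) (hi : i ≤ n - 1) (_hn : 1 ≤ n) :
    (pvGp a i j).1 ≤ (pvGp a (pvPe a (n-1)).2 j).1 := by
  have h1 := pvPe_ub a (n-1) i hi
  have h2 := pvPe_val a (n-1)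
  unfold pvGp
  simp only
  omega

lemma pvUpd_take (st p : Int × Int × Int) (h : st.1 < p.1) : pvUpd st p = p := by
  unfold pvUpd; split <;> [rfl; omega]

lemma pvUpd_drop (st p : Int × Int × Int) (h : p.1 ≤ st.1) : pvUpd st p = st := by
  unfold pvUpd; split <;> [omega; rfl]

lemma pvGp_lt (a : List Int) (n s : Nat) (hs : s < (pvPe a (n-1)).2) :
    (pvGp a s n).1 < (pvGp a (pvPe a (n-1)).2 n).1 := by
  have h1 := pvPe_first a (n-1) s hs
  have h2 := pvPe_val a (n-1)
  unfold pvGp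
  simp only
  omega

lemma pvTail_empty_I (a : List Int) (n s : Nat) (h : n ≤ s) : pvTailI a n s = [] := by
  unfold pvTailI
  have : n - s = 0 := by omega
  simp [this]

lemma pvTail_empty_P (a : List Int) (n s : Nat) (h : n ≤ s) : pvTailP a n s = [] := by
  unfold pvTailP
  have : n - s = 0 := by omega
  simp [this]

lemma pvCompanion (a : List Int) (n : Nat) (hn : 1 ≤ n) :
    ∀ (k : Nat) (s : Nat) (st : Int × Int × Int), s = n - k → (pvPe a (n-1)).2 < s →
      (pvGp a (pvPe a (n-1)).2 n).1 ≤ st.1 →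
      (pvTailI a n s).foldl pvUpd st = (pvTailP a n s).foldl pvUpd st := by
  intro k
  induction k with
  | zero =>
    intro s st hs _ _
    rw [pvTail_empty_I a n s (by omega), pvTail_empty_P a n s (by omega)]
  | succ k ih =>
    intro s st hs hse hst
    rcases Nat.lt_or_ge s n with hsn | hsn
    · rw [pvTailI_cons a n s hsn, pvTailP_cons a n s hsn, pvBlock_succ a n s hsn,
          List.foldl_append, List.foldl_append, List.foldl_append]
      simp only [List.foldl_cons, List.foldl_nil]
      have htge : (pvGp a (pvPe a (n-1)).2 n).1 ≤ ((pvBlock a n s).foldl pvUpd st).1 :=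
        le_trans hst (pvUpd_fst_le _ st)
      have hgle : (pvGp a s n).1 ≤ (pvGp a (pvPe a (n-1)).2 n).1 := pvGp_le a n s n (by omega) hn
      rw [pvUpd_drop _ _ (by omega)]
      exact ih (s+1) _ (by omega) (by omega) htge
    · rw [pvTail_empty_I a n s (by omega), pvTail_empty_P a n s (by omega)]

lemma pvCompanion' (a : List Int) (n : Nat) (hn : 1 ≤ n) (s : Nat) (st : Int × Int × Int)
    (hse : (pvPe a (n-1)).2 < s) (hst : (pvGp a (pvPe a (n-1)).2 n).1 ≤ st.1) :
    (pvTailI a n s).foldl pvUpd st = (pvTailP a n s).foldl pvUpd st := by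
  rcases Nat.lt_or_ge s n with hsn | hsn
  · exact pvCompanion a n hn (n - s) s st (by omega) hse hst
  · rw [pvTail_empty_I a n s (by omega), pvTail_empty_P a n s (by omega)]

lemma pvMain (a : List Int) (n : Nat) (hn : 1 ≤ n) :
    ∀ (k : Nat) (s : Nat) (st : Int × Int × Int), k ≤ (pvPe a (n-1)).2 → s = (pvPe a (n-1)).2 - k →
      (pvTailI a n s).foldl pvUpd st
        = pvUpd ((pvTailP a n s).foldl pvUpd st) (pvGp a (pvPe a (n-1)).2 n) := by
  intro k
  induction k with
  | zero =>
    intro s st _ hs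
    have hE : (pvPe a (n-1)).2 = s := by omega
    rw [show (pvPe a (n-1)).2 = s by omega]
    have hen : s < n := by have := pvPe_le a (n-1); omega
    rw [pvTailI_cons a n s hen, pvTailP_cons a n s hen, pvBlock_succ a n s hen,
        List.foldl_append, List.foldl_append, List.foldl_append]
    simp only [List.foldl_cons, List.foldl_nil]
    by_cases hc : (pvGp a s n).1 ≤ ((pvBlock a n s).foldl pvUpd st).1
    · rw [pvUpd_drop _ _ hc]
      rw [pvCompanion' a n hn (s+1) _ (by omega) (by rw [hE]; exact hc)]
      have hfin : (pvGp a s n).1 ≤ ((pvTailP a n (s+1)).foldl pvUpd ((pvBlock a n s).foldl pvUpd st)).1 :=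
        le_trans hc (pvUpd_fst_le _ _)
      rw [pvUpd_drop _ _ hfin]
    · push Not at hc
      rw [pvUpd_take _ _ hc]
      have hboundI : ∀ q ∈ pvTailI a n (s+1), q.1 ≤ (pvGp a s n).1 := by
        intro q hq
        obtain ⟨i, j, hsi, hin, hij, hjn, rfl⟩ := pvMem_tailI a n (s+1) q hq
        rcases Nat.lt_or_ge j n with hj | hj
        · have h1 : (pvGp a i j).1 ≤ (pvGp a s j).1 := hE ▸ pvGp_le a n i j (by omega) hn
          have h2 : pvGp a s j ∈ pvBlock a n s := (pvMem_block a n s _).mpr ⟨j, by omega, hj, rfl⟩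
          have h3 := pvUpd_mem_le (pvBlock a n s) st _ h2
          omega
        · have hjn' : j = n := by omega
          rw [hjn']
          exact hE ▸ pvGp_le a n i n (by omega) hn
      have hboundP : ∀ q ∈ pvTailP a n (s+1), q.1 ≤ ((pvBlock a n s).foldl pvUpd st).1 := by
        intro q hq
        obtain ⟨i, j, hsi, hij, hjn, rfl⟩ := pvMem_tailP a n (s+1) q hq
        have h1 : (pvGp a i j).1 ≤ (pvGp a s j).1 := hE ▸ pvGp_le a n i j (by omega) hn
        have h2 : pvGp a s j ∈ pvBlock a n s := (pvMem_block a n s _).mpr ⟨j, by omega, hjn, rfl⟩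
        have h3 := pvUpd_mem_le (pvBlock a n s) st _ h2
        omega
      rw [pvUpd_skip _ _ hboundI, pvUpd_skip _ _ hboundP, pvUpd_take _ _ hc]
  | succ k ih =>
    intro s st hk hs
    have hse : s < (pvPe a (n-1)).2 := by omega
    have hsn : s < n := by have := pvPe_le a (n-1); omega
    rw [pvTailI_cons a n s hsn, pvTailP_cons a n s hsn, pvBlock_succ a n s hsn,
        List.foldl_append, List.foldl_append, List.foldl_append]
    simp only [List.foldl_cons, List.foldl_nil]
    have hlt : (pvGp a s n).1 < (pvGp a (pvPe a (n-1)).2 n).1 := pvGp_lt a n s hse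
    by_cases hc : (pvGp a s n).1 ≤ ((pvBlock a n s).foldl pvUpd st).1
    · rw [pvUpd_drop _ _ hc]
      exact ih (s+1) _ (by omega) (by omega)
    · push Not at hc
      rw [pvUpd_take _ _ hc]
      have hen : (pvPe a (n-1)).2 < n := by have := pvPe_le a (n-1); omega
      have hts : (pvTailI a n (s+1)).foldl pvUpd (pvGp a s n)
          = (pvTailI a n (s+1)).foldl pvUpd ((pvBlock a n s).foldl pvUpd st) := by
        refine (pvUpd_two_state _ _ (pvGp a s n) (by omega) ?_).symm
        exact ⟨pvGp a (pvPe a (n-1)).2 n, pvP_mem_tailI a n (s+1) _ (by omega) hen, hlt⟩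
      rw [hts]
      exact ih (s+1) _ (by omega) (by omega)

lemma pvBridge (a : List Int) : ∀ (n : Nat) (st : Int × Int × Int),
    (pvTailP a n 0).foldl pvUpd st = (pvCands a n).foldl pvUpd st := by
  intro n
  induction n with
  | zero => intro st; simp [pvTailP, pvCands]
  | succ n ih =>
    intro st
    rcases Nat.eq_zero_or_pos n with hn0 | hn
    · subst hn0
      simp [pvTailP, pvCands, pvBlock, List.range'_succ]
    · have hL : pvTailP a (n+1) 0 = pvTailI a n 0 := by
        unfold pvTailP pvTailI
        simp only [Nat.sub_zero]
        rw [List.range'_1_concat, List.flatMap_append]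
        simp [pvBlock]
      have hR : pvCands a (n+1) = pvCands a n ++ [pvCand a n] := by
        unfold pvCands
        have h1 : n + 1 - 1 = (n-1) + 1 := by omega
        rw [h1, List.range_succ, List.map_append]
        simp only [List.map_cons, List.map_nil]
        have h2 : n - 1 + 1 = n := by omega
        rw [h2]
      have hcp : pvCand a n = pvGp a (pvPe a (n-1)).2 n := by
        unfold pvCand pvGp
        rw [pvPe_val a (n-1)]
      have hmain := pvMain a n hn (pvPe a (n-1)).2 0 st (le_refl _) (by omega)
      rw [hL, hmain, ih st, hR, List.foldl_append]
      simp only [List.foldl_cons, List.foldl_nil, hcp]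

lemma pvInner (a : List Int) (n k : Nat) (st : Int × Int × Int) :
    (PySem.List.pyRange ((k:Int)+1) (n:Int) 1).foldl (fun st j =>
      let _x := PySem.List.pyGetD a (k:Int) 0
      let _y := PySem.List.pyGetD a j 0
      let s := _x * 10 + _y
      if s > st.1 then (s, (k:Int), j) else st) st
    = (pvBlock a n k).foldl pvUpd st := by
  rw [PySem.List.pyRange_one, List.foldl_map]
  unfold pvBlock
  rw [List.foldl_map]
  have hN : (((n:Int)) - ((k:Int)+1)).toNat = n - (k+1) := by omega
  rw [hN]
  apply PySem.List.foldl_congr_mem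
  intro acc t _
  have h1 : (k:Int) + 1 + (t:Int) = ((k+1+t : Nat) : Int) := by push_cast; ring
  simp only [h1, PySem.List.pyGetD_natCast, pvUpd, pvGp, pvAv]

lemma pvCharA (bank : List Int) :
    best_two bank = [((pvTailP bank bank.length 0).foldl pvUpd (-1,0,0)).2.1,
                     ((pvTailP bank bank.length 0).foldl pvUpd (-1,0,0)).2.2] := by
  unfold best_two
  simp only [List.map_id']
  rw [PySem.List.pyRange_one, List.foldl_map]
  have hN : (((bank.length : Int)) - 0).toNat = bank.length := by omega
  rw [hN]
  unfold pvTailP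
  rw [Nat.sub_zero, ← List.range_eq_range', List.foldl_flatMap]
  refine congrArg (fun x : Int × Int × Int => [x.2.1, x.2.2]) ?_
  apply PySem.List.foldl_congr_mem
  intro acc k _
  have h0 : (0:Int) + (k:Int) = ((k:Nat):Int) := by ring
  rw [h0]
  exact pvInner bank bank.length k acc


def pvStepB (a : List Int) (st : (Int × Int × Int) × (Option Int × Int)) (k : Nat) :
    (Int × Int × Int) × (Option Int × Int) :=
  let v := pvAv a k
  let bv : Int := match st.2.1 with
    | none => v
    | some b => if v > b then v else b
  let bi : Int := match st.2.1 with
    | none => (k : Int)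
    | some b => if v > b then (k : Int) else st.2.2
  if bv * 10 + pvAv a (k+1) > st.1.1
    then ((bv * 10 + pvAv a (k+1), bi, ((k+1 : Nat) : Int)), (some bv, bi))
    else (st.1, (some bv, bi))

lemma pvBInv (a : List Int) (m : Nat) :
    (List.range m).foldl (pvStepB a) (((-1:Int),(0:Int),(0:Int)), ((none : Option Int), (0:Int)))
    = (((List.range m).map (fun k => pvCand a (k+1))).foldl pvUpd ((-1:Int),(0:Int),(0:Int)),
       if m = 0 then ((none : Option Int), (0:Int))
       else (some (pvPe a (m-1)).1, ((pvPe a (m-1)).2 : Int))) := by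
  induction m with
  | zero => simp
  | succ m ih =>
    rw [List.range_succ, List.foldl_append, List.map_append, List.foldl_append, ih]
    simp only [List.foldl_cons, List.foldl_nil, List.map_cons, List.map_nil]
    rcases Nat.eq_zero_or_pos m with hm | hm
    · subst hm
      unfold pvStepB pvCand pvUpd
      norm_num [pvPe]
      split <;> rfl
    · have hm' : ∃ m', m = m' + 1 := ⟨m - 1, by omega⟩
      obtain ⟨m', rfl⟩ := hm'
      simp only [if_neg (Nat.succ_ne_zero m'), Nat.add_sub_cancel]
      unfold pvStepB pvCand pvUpd
      simp only [Nat.add_sub_cancel]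
      by_cases hv : pvAv a (m'+1) > (pvPe a m').1
      · rw [pvPe_eq, if_pos hv]
        split <;> rfl
      · rw [pvPe_eq, if_neg hv]
        split <;> rfl

lemma pvCharB (bank : List Int) :
    best_two_alt bank = [((pvCands bank bank.length).foldl pvUpd (-1,0,0)).2.1,
                         ((pvCands bank bank.length).foldl pvUpd (-1,0,0)).2.2] := by
  unfold best_two_alt
  simp only [List.map_id']
  rw [PySem.List.pyRange_one, List.foldl_map]
  have hN : ((bank.length : Int) - 1).toNat = bank.length - 1 := by omega
  rw [hN]
  have hstep : (List.range (bank.length - 1)).foldl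
      (fun st (k : Nat) =>
        (fun (st : (Int × Int × Int) × (Option Int × Int)) (j : Int) =>
          let v := PySem.List.pyGetD bank (j - 1) 0
          let bv : Int := match st.2.1 with
            | none => v
            | some bv0 => if v > bv0 then v else bv0
          let bi : Int := match st.2.1 with
            | none => j - 1
            | some bv0 => if v > bv0 then j - 1 else st.2.2
          let s := bv * 10 + PySem.List.pyGetD bank j 0
          if s > st.1.1 then ((s, bi, j), (some bv, bi)) else (st.1, (some bv, bi)))
        st (1 + (k : Int)))
      (((-1 : Int), (0 : Int), (0 : Int)), ((none : Option Int), (0 : Int)))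
      = (List.range (bank.length - 1)).foldl (pvStepB bank)
          (((-1 : Int), (0 : Int), (0 : Int)), ((none : Option Int), (0 : Int))) := by
    apply PySem.List.foldl_congr_mem
    intro acc k _
    have h2 : (1 : Int) + (k : Int) = ((k + 1 : Nat) : Int) := by push_cast; ring
    have h3 : ((k + 1 : Nat) : Int) - 1 = ((k : Nat) : Int) := by push_cast; ring
    simp only [h2, h3, PySem.List.pyGetD_natCast]
    rfl
  rw [hstep, pvBInv]
  rfl

lemma pvFinal (bank : List Int) : best_two bank = best_two_alt bank := by
  rw [pvCharA, pvCharB, pvBridge bank bank.length ((-1 : Int), (0 : Int), (0 : Int))]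

-- ===== VERDICT (by name: the statement is the Claim_ definition above) =====
theorem best_two_spec : Claim_equal_best_two := by
  intro bank _
  unfold Spec_best_two
  exact pvFinal bank
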